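-- pv_equiv track=rewrite | github.com/jethzgg/IntroAI_Group_7 | tictactoe/tictactoe.py | getValidMove
-- ===== SOURCE A (Python) =====
-- EMPTY = '_'
--
-- N = 5
--
-- def getValidMove(board, radius) -> list:
--     has_move = False
--     moves = set()
--     for i in range(N):
--         for j in range(N):
--             if board[i][j] != EMPTY:
--                 for dx in range(-radius, radius + 1):
--                     for dy in range(-radius, radius + 1):
--                         new_x, new_y = i + dx, j + dy
--                         if 0 <= new_x < N and 0 <= new_y < N and board[new_x][new_y] == EMPTY:
--                             has_move = True
--                             moves.add((new_x, new_y))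
--     if not has_move:
--         return [(N // 2, N // 2)]
--     return list(moves)
-- ===== SOURCE B (Python) =====
-- EMPTY = '_'
--
-- N = 5
--
-- def getValidMove(board, radius) -> list:
--     occ = [(x, y) for x in range(N) for y in range(N) if board[x][y] != EMPTY]
--     moves = [(i, j) for i in range(N) for j in range(N)
--              if board[i][j] == EMPTY
--              and any(abs(i - x) <= radius and abs(j - y) <= radius for x, y in occ)]
--     return moves if moves else [(N // 2, N // 2)]
-- ===== Notes on version B (the rewrite author's own statement) =====
-- stated objective: alternative
-- what changed: Inverted traversal: instead of stamping every occupied cell's (2*radius+1)^2 neighborhood into a set, B collects the occupied cells once and tests each empty cell for an occupied cell within Chebyshev distance radius, building the result list row-major directly (same set of moves; the list order of A's list(set) is CPython-hash incidental and outputs are compared as sets).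
import Mathlib
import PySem

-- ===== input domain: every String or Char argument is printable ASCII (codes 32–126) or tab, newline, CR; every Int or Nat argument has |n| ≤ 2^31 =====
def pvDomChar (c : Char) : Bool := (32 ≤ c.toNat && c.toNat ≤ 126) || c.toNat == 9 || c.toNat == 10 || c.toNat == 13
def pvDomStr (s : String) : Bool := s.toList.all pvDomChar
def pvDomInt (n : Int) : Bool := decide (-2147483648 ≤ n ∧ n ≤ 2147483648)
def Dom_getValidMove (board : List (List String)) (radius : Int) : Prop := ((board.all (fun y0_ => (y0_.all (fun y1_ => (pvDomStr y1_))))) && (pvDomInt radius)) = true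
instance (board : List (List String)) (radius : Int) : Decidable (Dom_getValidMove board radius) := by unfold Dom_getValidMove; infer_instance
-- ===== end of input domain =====

-- B inverts the traversal: instead of stamping each occupied cell's (2·radius+1)² neighborhood
-- into a set, it collects the occupied cells once and tests each empty cell for an occupied cell
-- within Chebyshev distance radius, building the move list row-major directly. Return-value
-- equivalence is up to list order: A's list(moves) order is CPython set-hash incidental and the
-- output is compared as a set, so A's port renders list(moves) canonically (comment in the port).

-- board[i][j], as both Pythons write it (total form, used only under Pre_'s in-range condition)
def pvCell (board : List (List String)) (i j : Int) : String :=
  PySem.List.pyGetD (PySem.List.pyGetD board i []) j ""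

-- ===== PORT A =====
def getValidMove (board : List (List String)) (radius : Int) : List (Int × Int) :=
  let st :=
    (PySem.List.pyRange 0 5 1).foldl (fun st i =>
      (PySem.List.pyRange 0 5 1).foldl (fun st j =>
        if pvCell board i j ≠ "_" then
          (PySem.List.pyRange (-radius) (radius + 1) 1).foldl (fun st dx =>
            (PySem.List.pyRange (-radius) (radius + 1) 1).foldl (fun st dy =>
              if 0 ≤ i + dx ∧ i + dx < 5 ∧ 0 ≤ j + dy ∧ j + dy < 5 ∧
                  pvCell board (i + dx) (j + dy) = "_" then
                (true, PySem.Set.add st.2 (i + dx, j + dy))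
              else st) st) st
        else st) st)
      ((false, PySem.Set.empty) : Bool × PySem.Set (Int × Int))
  if st.1 = false then [(PySem.Int.floordiv 5 2, PySem.Int.floordiv 5 2)]
  else
    -- list(moves): the set's CPython iteration (hash) order is not modelled and the output is
    -- compared as a set; rendered canonically: sorted by the row-major position key, which on
    -- the set's members (all with 0 ≤ coordinates < 5) is exactly tuple order
    PySem.List.sorted st.2 (fun p => p.1 * 5 + p.2) false

-- ===== PORT B =====
def getValidMove_alt (board : List (List String)) (radius : Int) : List (Int × Int) :=
  let occ := (PySem.List.pyRange 0 5 1).flatMap (fun x =>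
    (PySem.List.pyRange 0 5 1).filterMap (fun y =>
      if pvCell board x y ≠ "_" then some (x, y) else none))
  let moves := (PySem.List.pyRange 0 5 1).flatMap (fun i =>
    (PySem.List.pyRange 0 5 1).filterMap (fun j =>
      if pvCell board i j = "_" ∧
          occ.any (fun o => decide (|i - o.1| ≤ radius ∧ |j - o.2| ≤ radius)) = true then
        some (i, j)
      else none))
  if moves = [] then [(PySem.Int.floordiv 5 2, PySem.Int.floordiv 5 2)] else moves

-- ===== PRECONDITION & SPEC =====
-- Pre_: both Pythons index board[i][j] for every 0 ≤ i, j < 5; a board with fewer than 5 rows,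
-- or a short row among the first 5, raises IndexError in both.
def Pre_getValidMove (board : List (List String)) (radius : Int) : Prop :=
  5 ≤ board.length ∧ ∀ r ∈ board.take 5, 5 ≤ r.length
instance (board : List (List String)) (radius : Int) : Decidable (Pre_getValidMove board radius) := by unfold Pre_getValidMove; infer_instance

def pvWitness_getValidMove : List (List String) × Int :=
  ([["_", "_", "_", "_", "_"], ["_", "_", "X", "_", "_"], ["_", "_", "_", "_", "_"],
    ["_", "_", "_", "_", "_"], ["_", "_", "_", "_", "_"]], 1)

def Spec_getValidMove (board : List (List String)) (radius : Int) (out : List (Int × Int)) : Prop := out = getValidMove_alt board radius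
instance (board : List (List String)) (radius : Int) (out : List (Int × Int)) : Decidable (Spec_getValidMove board radius out) := by unfold Spec_getValidMove; infer_instance

-- ===== CLAIM (what is proved, stated in full; the proofs are below) =====
def Claim_equal_getValidMove : Prop := ∀ (board : List (List String)) (radius : Int), Dom_getValidMove board radius → Pre_getValidMove board radius → Spec_getValidMove board radius (getValidMove board radius)

-- ===== LEMMAS AND PROOFS =====

-- loop shapes of port A's nested folds
theorem pv_foldl_inner (l : List Int) (C : Int → Prop) [DecidablePred C] (m : Int → Int × Int)
    (st : Bool × PySem.Set (Int × Int)) :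
    l.foldl (fun st dy => if C dy then (true, PySem.Set.add st.2 (m dy)) else st) st
      = (st.1 || l.any (fun dy => decide (C dy)),
         PySem.Set.update st.2 ((l.filter (fun dy => decide (C dy))).map m)) := by
  induction l generalizing st with
  | nil => simp [PySem.Set.update]
  | cons hd tl ih =>
    by_cases h : C hd
    · simp [h, List.foldl_cons, ih, PySem.Set.update]
    · simp [h, List.foldl_cons, ih]

theorem pv_foldl_outer (l : List Int) (b : Int → Bool) (g : Int → List (Int × Int))
    (st : Bool × PySem.Set (Int × Int)) :
    l.foldl (fun st x => (st.1 || b x, PySem.Set.update st.2 (g x))) st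
      = (st.1 || l.any b, PySem.Set.update st.2 (l.flatMap g)) := by
  induction l generalizing st with
  | nil => simp [PySem.Set.update]
  | cons hd tl ih =>
    rw [List.foldl_cons, ih]
    simp [PySem.Set.update, List.foldl_append, Bool.or_assoc]

theorem pv_if_step (P : Prop) [Decidable P] (st : Bool × PySem.Set (Int × Int)) (b : Bool)
    (g : List (Int × Int)) :
    (if P then (st.1 || b, PySem.Set.update st.2 g) else st)
      = (st.1 || (decide P && b), PySem.Set.update st.2 (if P then g else [])) := by
  by_cases h : P <;> simp [h, PySem.Set.update]

-- names for the two normal forms: the list A's folds accumulate, A's has_move flag,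
-- and B's occ / moves lists
def pvL (board : List (List String)) (radius : Int) : List (Int × Int) :=
  (PySem.List.pyRange 0 5 1).flatMap (fun i =>
    (PySem.List.pyRange 0 5 1).flatMap (fun j =>
      if pvCell board i j ≠ "_" then
        (PySem.List.pyRange (-radius) (radius + 1) 1).flatMap (fun dx =>
          ((PySem.List.pyRange (-radius) (radius + 1) 1).filter (fun dy =>
            decide (0 ≤ i + dx ∧ i + dx < 5 ∧ 0 ≤ j + dy ∧ j + dy < 5 ∧
              pvCell board (i + dx) (j + dy) = "_"))).map (fun dy => (i + dx, j + dy)))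
      else []))

def pvAny (board : List (List String)) (radius : Int) : Bool :=
  (PySem.List.pyRange 0 5 1).any (fun i =>
    (PySem.List.pyRange 0 5 1).any (fun j =>
      decide (pvCell board i j ≠ "_") &&
        (PySem.List.pyRange (-radius) (radius + 1) 1).any (fun dx =>
          (PySem.List.pyRange (-radius) (radius + 1) 1).any (fun dy =>
            decide (0 ≤ i + dx ∧ i + dx < 5 ∧ 0 ≤ j + dy ∧ j + dy < 5 ∧
              pvCell board (i + dx) (j + dy) = "_")))))

def pvOcc (board : List (List String)) : List (Int × Int) :=
  (PySem.List.pyRange 0 5 1).flatMap (fun x =>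
    (PySem.List.pyRange 0 5 1).filterMap (fun y =>
      if pvCell board x y ≠ "_" then some (x, y) else none))

def pvMovesB (board : List (List String)) (radius : Int) : List (Int × Int) :=
  (PySem.List.pyRange 0 5 1).flatMap (fun i =>
    (PySem.List.pyRange 0 5 1).filterMap (fun j =>
      if pvCell board i j = "_" ∧
          (pvOcc board).any (fun o => decide (|i - o.1| ≤ radius ∧ |j - o.2| ≤ radius)) = true then
        some (i, j)
      else none))

theorem pv_A_norm (board : List (List String)) (radius : Int) :
    getValidMove board radius =
      (if pvAny board radius = false then [(PySem.Int.floordiv 5 2, PySem.Int.floordiv 5 2)]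
       else PySem.List.sorted (PySem.Set.update PySem.Set.empty (pvL board radius))
         (fun p => p.1 * 5 + p.2) false) := by
  simp only [getValidMove, pv_foldl_inner, pv_if_step, pv_foldl_outer, Bool.false_or]
  rfl

theorem pv_B_norm (board : List (List String)) (radius : Int) :
    getValidMove_alt board radius =
      (if pvMovesB board radius = [] then [(PySem.Int.floordiv 5 2, PySem.Int.floordiv 5 2)]
       else pvMovesB board radius) := rfl

-- the crux: the same cells are collected (A: empty cell reached from an occupied one;
-- B: empty cell with an occupied cell in range)
theorem pv_mem_L (board : List (List String)) (radius : Int) (p : Int × Int) :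
    p ∈ pvL board radius ↔ p ∈ pvMovesB board radius := by
  obtain ⟨a, b⟩ := p
  simp only [pvL, pvMovesB, pvOcc, List.mem_flatMap, List.mem_filterMap, List.mem_filter,
    List.mem_map, PySem.List.mem_pyRange_one, List.any_eq_true, Prod.mk.injEq,
    Option.ite_none_right_eq_some, Option.some.injEq, List.mem_ite_nil_right, decide_eq_true_eq]
  constructor
  · rintro ⟨i, hi, j, hj, hne, dx, hdx, dy, ⟨hdy, h1, h2, h3, h4, hE⟩, ha, hb⟩
    refine ⟨a, by omega, b, by omega, ⟨⟨?_, ⟨(i, j), ⟨i, hi, j, hj, hne, rfl⟩, ?_, ?_⟩⟩, rfl, rfl⟩⟩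
    · rw [← ha, ← hb]; exact hE
    · rw [abs_le]; omega
    · rw [abs_le]; omega
  · rintro ⟨i, hi, j, hj, ⟨⟨hE, ⟨x, ⟨u, hu, v, hv, hne, hx⟩, habs1, habs2⟩⟩, ha, hb⟩⟩
    subst hx
    have h1 := abs_le.mp habs1
    have h2 := abs_le.mp habs2
    refine ⟨u, hu, v, hv, hne, i - u, by omega, j - v,
      ⟨⟨by omega, by omega, by omega, by omega, by omega, ?_⟩, by omega, by omega⟩⟩
    have e1 : u + (i - u) = i := by ring
    have e2 : v + (j - v) = j := by ring
    rw [e1, e2]; exact hE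

-- A's has_move flag is exactly "some move was collected"
theorem pv_any_iff (board : List (List String)) (radius : Int) :
    pvAny board radius = true ↔ ∃ p, p ∈ pvL board radius := by
  simp only [pvAny, pvL, List.any_eq_true, List.mem_flatMap, List.mem_filter, List.mem_map,
    PySem.List.mem_pyRange_one, List.mem_ite_nil_right, Bool.and_eq_true, decide_eq_true_eq,
    Prod.exists]
  constructor
  · rintro ⟨i, hi, j, hj, hne, dx, hdx, dy, hdy, hc⟩
    exact ⟨i + dx, j + dy, i, hi, j, hj, hne, dx, hdx, dy, ⟨⟨hdy, hc⟩, rfl⟩⟩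
  · rintro ⟨a, b, i, hi, j, hj, hne, dx, hdx, dy, ⟨hdy, hc⟩, hab⟩
    exact ⟨i, hi, j, hj, hne, dx, hdx, dy, hdy, hc⟩

-- B's list is (strictly) row-major ordered: it is a sublist of the full 5×5 grid, which is
def pvP25 : List (Int × Int) :=
  (PySem.List.pyRange 0 5 1).flatMap (fun i => (PySem.List.pyRange 0 5 1).map (fun j => (i, j)))

theorem pv_filterMap_ite_sublist {α : Type} (l : List Int) (C : Int → Prop) [DecidablePred C]
    (f : Int → α) :
    (l.filterMap (fun j => if C j then some (f j) else none)).Sublist (l.map f) := by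
  induction l with
  | nil => simp
  | cons hd tl ih =>
    by_cases h : C hd
    · simpa [h] using ih.cons₂ (f hd)
    · simpa [h] using ih.cons (f hd)

theorem pv_flatMap_sublist {α : Type} (l : List Int) (f g : Int → List α)
    (h : ∀ a ∈ l, (f a).Sublist (g a)) : (l.flatMap f).Sublist (l.flatMap g) := by
  induction l with
  | nil => simp
  | cons hd tl ih =>
    simp only [List.flatMap_cons]
    exact (h hd (by simp)).append (ih (fun a ha => h a (by simp [ha])))

theorem pv_P25_pairwise : pvP25.Pairwise (fun u v => u.1 * 5 + u.2 < v.1 * 5 + v.2) := by decide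

theorem pv_movesB_pairwise (board : List (List String)) (radius : Int) :
    (pvMovesB board radius).Pairwise (fun u v => u.1 * 5 + u.2 < v.1 * 5 + v.2) := by
  refine pv_P25_pairwise.sublist ?_
  exact pv_flatMap_sublist _ _ _ (fun i _ => pv_filterMap_ite_sublist _ _ _)

theorem pv_movesB_nodup (board : List (List String)) (radius : Int) :
    (pvMovesB board radius).Nodup :=
  (pv_movesB_pairwise board radius).imp (fun h => by rintro rfl; omega)

-- ===== VERDICT (by name: the statement is the Claim_ definition above) =====
theorem getValidMove_spec : Claim_equal_getValidMove := by
  intro board radius _ _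
  unfold Spec_getValidMove
  rw [pv_A_norm, pv_B_norm, PySem.Set.update_empty]
  have hmem : ∀ p, p ∈ PySem.Set.ofList (pvL board radius) ↔ p ∈ pvMovesB board radius := by
    intro p; rw [PySem.Set.mem_ofList]; exact pv_mem_L board radius p
  by_cases hm : pvMovesB board radius = []
  · have hany : pvAny board radius = false := by
      rw [Bool.eq_false_iff]
      intro h
      obtain ⟨p, hp⟩ := (pv_any_iff board radius).mp h
      rw [pv_mem_L, hm] at hp
      exact absurd hp (List.not_mem_nil)
    rw [if_pos hany, if_pos hm]
  · have hany : ¬ pvAny board radius = false := by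
      intro h
      apply hm
      rw [List.eq_nil_iff_forall_not_mem]
      intro p hp
      exact absurd ((pv_any_iff board radius).mpr ⟨p, (pv_mem_L board radius p).mpr hp⟩)
        (by simp [h])
    rw [if_neg hany, if_neg hm]
    exact PySem.List.sorted_eq_of_perm_of_pairwise_lt _ _ _
      ((List.perm_ext_iff_of_nodup (pv_movesB_nodup board radius)
        (PySem.Set.nodup_ofList _)).mpr (fun p => (hmem p).symm))
      (pv_movesB_pairwise board radius)
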